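-- pv_equiv track=rewrite | github.com/soo1e/KillingCamp | week2/Two_Queue_Sum.py | solution
-- ===== SOURCE A (Python) =====
-- from collections import deque
--
-- def solution(queue1, queue2):
--     # 주어진 큐를 deque를 통해 q1, q2 생성
--     q1 = deque(queue1)
--     q2 = deque(queue2)
--
--     q_size = len(q1)
--
--     for i in range(0, 3 * q_size):
--         # q1의 합이 평균과 같다면 이를 리턴한다.
--         if sum(q1) == sum(q2):
--             return i
--
--         # 만약 q1의 합이 평균보다 작으면 q2에서 요소를 가져와서 더한다.
--         elif sum(q1) < sum(q2):
--             temp = q2.popleft()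
--             q1.append(temp)
--
--         # 만약 q2의 합이 평균보다 작으면 q1에서 요소를 가져와서 더한다.
--         else:
--             temp = q1.popleft()
--             q2.append(temp)
--
--     # 반복문을 다 돌렸을 때 안 되면 -1을 리턴
--     return -1
-- ===== SOURCE B (Python) =====
-- def solution(queue1, queue2):
--     # Two pointers over the circular concatenation; running sum instead of
--     # recomputing sum(q1)/sum(q2) on every iteration.
--     arr = queue1 + queue2
--     n = len(arr)
--     total = sum(arr)
--     s1 = sum(queue1)
--     l, r = 0, len(queue1)          # q1 is the circular window arr[l:r]
--     for i in range(3 * len(queue1)):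
--         if 2 * s1 == total:
--             return i
--         if 2 * s1 < total:
--             s1 += arr[r % n]
--             r += 1
--         else:
--             s1 -= arr[l % n]
--             l += 1
--     return -1
-- ===== Notes on version B (the rewrite author's own statement) =====
-- stated objective: faster
-- what changed: Replaces the deque simulation that recomputes sum(q1) and sum(q2) on every iteration with a two-pointer circular window over queue1+queue2 and an incrementally maintained running sum, so each iteration is O(1).
-- outside the precondition, e.g. on solution([-1], [-1]): A returns 0, B returns 0; on solution([-1], []): A raises IndexError, B returns -1
import Mathlib
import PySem

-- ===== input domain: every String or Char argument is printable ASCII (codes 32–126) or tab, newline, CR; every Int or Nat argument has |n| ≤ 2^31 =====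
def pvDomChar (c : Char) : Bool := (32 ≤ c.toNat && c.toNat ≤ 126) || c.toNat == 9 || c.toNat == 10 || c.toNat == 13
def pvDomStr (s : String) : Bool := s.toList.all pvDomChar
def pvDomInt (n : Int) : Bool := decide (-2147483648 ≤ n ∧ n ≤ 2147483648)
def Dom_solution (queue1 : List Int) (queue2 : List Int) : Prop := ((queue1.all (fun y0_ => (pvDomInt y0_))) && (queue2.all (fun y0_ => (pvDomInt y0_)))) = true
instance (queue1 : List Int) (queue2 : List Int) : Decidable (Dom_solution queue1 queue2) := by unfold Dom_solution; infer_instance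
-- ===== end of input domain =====

-- B replaces A's deque simulation with repeated full sums by a two-pointer
-- circular window over queue1 ++ queue2 with an incrementally maintained sum
-- (objective: faster, O(n) instead of O(n^2)).

-- ===== PORT A =====
-- loop `for i in range(0, 3*q_size)` as fuel recursion; popleft from an empty
-- deque is Python's IndexError, excluded by Pre_solution (the 0 result on that
-- branch is never reached inside Pre_solution).
def solA_loop (q1 : List Int) (q2 : List Int) (i : Nat) (fuel : Nat) : Int :=
  match fuel with
  | 0 => -1
  | fuel + 1 =>
    if q1.sum = q2.sum then (i : Int)
    else if q1.sum < q2.sum then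
      match q2 with
      | [] => 0   -- IndexError in Python: outside Pre_solution
      | t :: rest => solA_loop (q1 ++ [t]) rest (i + 1) fuel
    else
      match q1 with
      | [] => 0   -- IndexError in Python: outside Pre_solution
      | t :: rest => solA_loop rest (q2 ++ [t]) (i + 1) fuel

def solution (queue1 : List Int) (queue2 : List Int) : Int :=
  solA_loop queue1 queue2 0 (3 * queue1.length)

-- ===== PORT B =====
-- arr[r % n] with 0 ≤ r % n < n is exact as arr.getD (r % n) 0 (the body only
-- runs when 3*queue1.length > 0, hence n > 0 and the index is in range).
def solB_loop (arr : List Int) (n : Nat) (total : Int) (s1 : Int) (l r : Nat)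
    (i : Nat) (fuel : Nat) : Int :=
  match fuel with
  | 0 => -1
  | fuel + 1 =>
    if 2 * s1 = total then (i : Int)
    else if 2 * s1 < total then
      solB_loop arr n total (s1 + arr.getD (r % n) 0) l (r + 1) (i + 1) fuel
    else
      solB_loop arr n total (s1 - arr.getD (l % n) 0) (l + 1) r (i + 1) fuel

def solution_alt (queue1 : List Int) (queue2 : List Int) : Int :=
  let arr := queue1 ++ queue2
  solB_loop arr arr.length arr.sum queue1.sum 0 queue1.length 0 (3 * queue1.length)

-- ===== PRECONDITION & SPEC =====
-- Pre_ excludes inputs whose total sum is negative: only there can A pop from an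
-- emptied deque and raise IndexError (on some negative-total inputs A still
-- returns, and B agrees there too, but the closed-form bound is this sum).
def Pre_solution (queue1 : List Int) (queue2 : List Int) : Prop :=
  0 ≤ queue1.sum + queue2.sum
instance (queue1 : List Int) (queue2 : List Int) : Decidable (Pre_solution queue1 queue2) := by
  unfold Pre_solution; infer_instance

def pvWitness_solution : List Int × List Int := ([1, 2], [3])

def Spec_solution (queue1 : List Int) (queue2 : List Int) (out : Int) : Prop := out = solution_alt queue1 queue2
instance (queue1 : List Int) (queue2 : List Int) (out : Int) : Decidable (Spec_solution queue1 queue2 out) := by unfold Spec_solution; infer_instance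

-- ===== CLAIM (what is proved, stated in full; the proofs are below) =====
def Claim_equal_solution : Prop := ∀ (queue1 : List Int) (queue2 : List Int), Dom_solution queue1 queue2 → Pre_solution queue1 queue2 → Spec_solution queue1 queue2 (solution queue1 queue2)

-- ===== LEMMAS AND PROOFS =====

-- circular window of length `len` starting at `a` in `arr` (n = arr.length)
def pvWindow (arr : List Int) (n a len : Nat) : List Int :=
  (List.range len).map (fun k => arr.getD ((a + k) % n) 0)

lemma pvWindow_zero (arr : List Int) (n a : Nat) : pvWindow arr n a 0 = [] := rfl

lemma pvWindow_succ_left (arr : List Int) (n a len : Nat) :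
    pvWindow arr n a (len + 1) = arr.getD (a % n) 0 :: pvWindow arr n (a + 1) len := by
  simp [pvWindow, List.range_succ_eq_map, List.map_map, Function.comp]
  intro k _
  have h : a + (k + 1) = a + 1 + k := by omega
  rw [h]

lemma pvWindow_succ_right (arr : List Int) (n a len : Nat) :
    pvWindow arr n a (len + 1) = pvWindow arr n a len ++ [arr.getD ((a + len) % n) 0] := by
  simp [pvWindow, List.range_succ]

lemma pvWindow_length (arr : List Int) (n a len : Nat) :
    (pvWindow arr n a len).length = len := by simp [pvWindow]

lemma pvWindow_eq_rotate (arr : List Int) (a : Nat) (h : arr ≠ []) :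
    pvWindow arr arr.length a arr.length = arr.rotate a := by
  have hn : 0 < arr.length := List.length_pos_of_ne_nil h
  apply List.ext_getElem
  · simp [pvWindow_length, List.length_rotate]
  · intro i h1 h2
    simp only [pvWindow, List.getElem_map, List.getElem_range]
    rw [List.getElem_rotate]
    have hi : i < arr.length := by simpa [List.length_rotate] using h2
    have hlt : (a + i) % arr.length < arr.length := Nat.mod_lt _ hn
    rw [List.getD_eq_getElem _ _ hlt]
    congr 1
    rw [Nat.add_comm]

lemma pvWindow_full_sum (arr : List Int) (a : Nat) :
    (pvWindow arr arr.length a arr.length).sum = arr.sum := by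
  rcases eq_or_ne arr [] with rfl | h
  · simp [pvWindow]
  · rw [pvWindow_eq_rotate arr a h]
    exact (List.rotate_perm arr a).sum_eq

lemma pvWindow_add (arr : List Int) (n a x y : Nat) :
    pvWindow arr n a (x + y) = pvWindow arr n a x ++ pvWindow arr n (a + x) y := by
  induction y with
  | zero => simp [pvWindow_zero]
  | succ y ih =>
    have h1 : x + (y + 1) = (x + y) + 1 := by omega
    have h2 : a + (x + y) = a + x + y := by omega
    rw [h1, pvWindow_succ_right, ih, pvWindow_succ_right, List.append_assoc, h2]

-- partition of arr's sum into the two circular windows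
lemma pvWindow_partition_sum (arr : List Int) (l r : Nat) (hlr : l ≤ r)
    (hr : r - l ≤ arr.length) :
    (pvWindow arr arr.length l (r - l)).sum
      + (pvWindow arr arr.length r (arr.length - (r - l))).sum = arr.sum := by
  have h1 : (r - l) + (arr.length - (r - l)) = arr.length := by omega
  have h2 : l + (r - l) = r := by omega
  have hs := pvWindow_add arr arr.length l (r - l) (arr.length - (r - l))
  rw [h2, h1] at hs
  have hfull := pvWindow_full_sum arr l
  rw [hs, List.sum_append] at hfull
  linarith [hfull]

-- in-range window is a plain sublist
lemma pvWindow_eq_extract (arr : List Int) (a len : Nat) (h : a + len ≤ arr.length) :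
    pvWindow arr arr.length a len = (arr.drop a).take len := by
  apply List.ext_getElem
  · simp [pvWindow_length]; omega
  · intro i h1 h2
    simp only [pvWindow, List.getElem_map, List.getElem_range]
    have hi : i < len := by simpa [pvWindow_length] using h1
    have hlt : a + i < arr.length := by omega
    have hm : (a + i) % arr.length = a + i := Nat.mod_eq_of_lt hlt
    rw [hm, List.getD_eq_getElem _ _ hlt]
    simp

-- one-step unfoldings of the two loops
lemma solA_loop_succ (q1 q2 : List Int) (i fuel : Nat) :
    solA_loop q1 q2 i (fuel + 1) =
      if q1.sum = q2.sum then (i : Int)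
      else if q1.sum < q2.sum then
        match q2 with
        | [] => 0
        | t :: rest => solA_loop (q1 ++ [t]) rest (i + 1) fuel
      else
        match q1 with
        | [] => 0
        | t :: rest => solA_loop rest (q2 ++ [t]) (i + 1) fuel := rfl

lemma solB_loop_succ (arr : List Int) (n : Nat) (total s1 : Int) (l r i fuel : Nat) :
    solB_loop arr n total s1 l r i (fuel + 1) =
      if 2 * s1 = total then (i : Int)
      else if 2 * s1 < total then
        solB_loop arr n total (s1 + arr.getD (r % n) 0) l (r + 1) (i + 1) fuel
      else
        solB_loop arr n total (s1 - arr.getD (l % n) 0) (l + 1) r (i + 1) fuel := rfl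

-- main simulation invariant
lemma pvLoop_eq (arr : List Int) (htot : 0 ≤ arr.sum) :
    ∀ (fuel l r i : Nat), l ≤ r → r - l ≤ arr.length →
      solA_loop (pvWindow arr arr.length l (r - l))
                (pvWindow arr arr.length r (arr.length - (r - l))) i fuel
        = solB_loop arr arr.length arr.sum
            (pvWindow arr arr.length l (r - l)).sum l r i fuel := by
  intro fuel
  induction fuel with
  | zero => intro l r i _ _; simp [solA_loop, solB_loop]
  | succ fuel ih =>
    intro l r i hlr hr
    have hpart := pvWindow_partition_sum arr l r hlr hr
    rw [solA_loop_succ, solB_loop_succ]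
    by_cases heq : 2 * (pvWindow arr arr.length l (r - l)).sum = arr.sum
    · have hq : (pvWindow arr arr.length l (r - l)).sum
          = (pvWindow arr arr.length r (arr.length - (r - l))).sum := by linarith
      rw [if_pos hq, if_pos heq]
    · have hq : ¬ (pvWindow arr arr.length l (r - l)).sum
          = (pvWindow arr arr.length r (arr.length - (r - l))).sum := by
        intro h; apply heq; linarith
      rw [if_neg hq, if_neg heq]
      by_cases hlt : 2 * (pvWindow arr arr.length l (r - l)).sum < arr.sum
      · -- A takes from q2, B advances r
        have hlt2 : (pvWindow arr arr.length l (r - l)).sum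
            < (pvWindow arr arr.length r (arr.length - (r - l))).sum := by linarith
        rw [if_pos hlt2, if_pos hlt]
        have hrl : r - l < arr.length := by
          by_contra hcon
          have hfull : r - l = arr.length := by omega
          have hs : (pvWindow arr arr.length l (r - l)).sum = arr.sum := by
            rw [hfull]; exact pvWindow_full_sum arr l
          omega
        have hW2 : pvWindow arr arr.length r (arr.length - (r - l))
            = arr.getD (r % arr.length) 0
              :: pvWindow arr arr.length (r + 1) (arr.length - (r + 1 - l)) := by
          have h4 : arr.length - (r - l) = (arr.length - (r + 1 - l)) + 1 := by omega
          rw [h4, pvWindow_succ_left]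
        rw [hW2]
        dsimp only
        have happ : pvWindow arr arr.length l (r - l) ++ [arr.getD (r % arr.length) 0]
            = pvWindow arr arr.length l (r + 1 - l) := by
          have h2 : r + 1 - l = (r - l) + 1 := by omega
          rw [h2, pvWindow_succ_right, show l + (r - l) = r from by omega]
        rw [happ, ih l (r + 1) (i + 1) (by omega) (by omega)]
        congr 1
        rw [← happ, List.sum_append]
        simp
      · -- A takes from q1, B advances l
        have hgt2 : ¬ (pvWindow arr arr.length l (r - l)).sum
            < (pvWindow arr arr.length r (arr.length - (r - l))).sum := by
          intro h; apply hlt; linarith [lt_of_le_of_ne (le_of_not_gt (by linarith)) (Ne.symm heq)]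
        rw [if_neg hgt2, if_neg hlt]
        have hpos : 0 < r - l := by
          by_contra hcon
          have h0 : r - l = 0 := by omega
          have hs : (pvWindow arr arr.length l (r - l)).sum = 0 := by
            rw [h0, pvWindow_zero]; rfl
          omega
        have hW1 : pvWindow arr arr.length l (r - l)
            = arr.getD (l % arr.length) 0
              :: pvWindow arr arr.length (l + 1) (r - (l + 1)) := by
          have h4 : r - l = (r - (l + 1)) + 1 := by omega
          rw [h4, pvWindow_succ_left]
        rw [hW1]
        dsimp only
        have happ : pvWindow arr arr.length r (arr.length - (r - l))
              ++ [arr.getD (l % arr.length) 0]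
            = pvWindow arr arr.length r (arr.length - (r - (l + 1))) := by
          have h2 : arr.length - (r - (l + 1)) = (arr.length - (r - l)) + 1 := by omega
          rw [h2, pvWindow_succ_right,
            show r + (arr.length - (r - l)) = arr.length + l from by omega,
            Nat.add_mod_left]
        rw [happ, ih (l + 1) r (i + 1) (by omega) (by omega)]
        congr 1
        rw [List.sum_cons]
        ring

-- ===== VERDICT (by name: the statement is the Claim_ definition above) =====
theorem solution_spec : Claim_equal_solution := by
  intro queue1 queue2 _ hpre
  unfold Spec_solution solution solution_alt
  have harr : (queue1 ++ queue2).sum = queue1.sum + queue2.sum := List.sum_append ..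
  have htot : 0 ≤ (queue1 ++ queue2).sum := by rw [harr]; exact hpre
  set arr := queue1 ++ queue2 with harrdef
  have hn : arr.length = queue1.length + queue2.length := by simp [harrdef]
  have h1 : pvWindow arr arr.length 0 (queue1.length - 0) = queue1 := by
    have h0 : queue1.length - 0 = queue1.length := by omega
    rw [h0, pvWindow_eq_extract arr 0 queue1.length (by omega)]
    simp [harrdef]
  have h2 : pvWindow arr arr.length queue1.length (arr.length - (queue1.length - 0)) = queue2 := by
    have hlen : arr.length - (queue1.length - 0) = queue2.length := by omega
    rw [hlen, pvWindow_eq_extract arr queue1.length queue2.length (by omega)]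
    simp [harrdef]
  have key := pvLoop_eq arr htot (3 * queue1.length) 0 queue1.length 0 (by omega) (by omega)
  rw [h1, h2] at key
  rw [key]
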